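-- pv_equiv track=rewrite | github.com/Rabadan-Ibr/Sarafan | Sarafan_script.py | generate_seq
-- ===== SOURCE A (Python) =====
-- def generate_seq(n):
--     number = 1
--     cur_count = 0
--     result = []
--     while True:
--         for _ in range(number):
--             if cur_count == n:
--                 return result
--             result.append(number)
--             cur_count += 1
--         number += 1
-- ===== SOURCE B (Python) =====
-- def generate_seq(n):
--     result = []
--     k = 1
--     t = 1  # t is always the k-th triangular number = index where value k+1 starts
--     for i in range(n):
--         if i == t:
--             k += 1
--             t += k
--         result.append(k)
--     return result
-- ===== Notes on version B (the rewrite author's own statement) =====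
-- stated objective: alternative
-- what changed: Replaced the nested emit-value-k-exactly-k-times loops with early return by a single indexed pass that derives each element from its position by tracking the running triangular-number threshold.
import Mathlib
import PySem

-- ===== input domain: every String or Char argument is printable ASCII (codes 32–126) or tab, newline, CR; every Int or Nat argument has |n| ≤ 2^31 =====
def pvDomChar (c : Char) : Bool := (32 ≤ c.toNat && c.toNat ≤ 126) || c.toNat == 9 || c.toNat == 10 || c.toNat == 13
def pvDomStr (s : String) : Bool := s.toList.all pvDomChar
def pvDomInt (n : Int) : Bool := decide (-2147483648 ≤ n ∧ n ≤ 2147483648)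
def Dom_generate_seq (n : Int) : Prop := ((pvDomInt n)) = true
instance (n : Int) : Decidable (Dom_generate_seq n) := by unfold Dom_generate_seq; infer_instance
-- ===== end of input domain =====

-- B replaces A's nested emit-k-copies-of-k loops by a single indexed pass tracking the running triangular threshold; same O(n) cost ("alternative").
-- A diverges (infinite loop) for negative n, so Pre_ restricts to nonnegative n.

-- ===== PORT A =====
-- inner `for _ in range(number)` of A: returns (some result) on the early `return result`,
-- otherwise `none` plus the updated (cur_count, result) after `number` appends.
def aInner (n number : Int) : Int → List Int → Nat → Option (List Int) × Int × List Int
  | cur, res, 0 => (none, cur, res)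
  | cur, res, k+1 =>
    if cur == n then (some res, cur, res)
    else aInner n number (cur + 1) (res ++ [number]) k

-- outer `while True` of A; fuel (n.toNat + 1) only makes the loop total: each outer pass
-- appends `number ≥ 1` elements, so the early return fires within that many passes when 0 ≤ n.
def aOuter (n : Int) : Int → Int → List Int → Nat → List Int
  | _, _, res, 0 => res
  | number, cur, res, fuel+1 =>
    match aInner n number cur res number.toNat with
    | (some r, _, _) => r
    | (none, cur', res') => aOuter n (number + 1) cur' res' fuel

def generate_seq (n : Int) : List Int := aOuter n 1 0 [] (n.toNat + 1)

-- ===== PORT B =====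
-- loop body of Source B's `for i in range(n)`: state (k, t, result)
def bStep (st : Int × Int × List Int) (i : Int) : Int × Int × List Int :=
  let k := st.1
  let t := st.2.1
  let result := st.2.2
  let kt := if i == t then (k + 1, t + (k + 1)) else (k, t)
  (kt.1, kt.2, result ++ [kt.1])

def generate_seq_alt (n : Int) : List Int :=
  ((PySem.List.pyRange 0 n 1).foldl bStep (1, 1, ([] : List Int))).2.2

-- ===== PRECONDITION & SPEC =====
-- A never returns for negative n (the `cur_count == n` guard is never hit): those inputs are outside Pre_.
def Pre_generate_seq (n : Int) : Prop := 0 ≤ n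
instance (n : Int) : Decidable (Pre_generate_seq n) := by unfold Pre_generate_seq; infer_instance
def pvWitness_generate_seq : Int := (7)
def Spec_generate_seq (n : Int) (out : List Int) : Prop := out = generate_seq_alt n
instance (n : Int) (out : List Int) : Decidable (Spec_generate_seq n out) := by unfold Spec_generate_seq; infer_instance

-- ===== CLAIM (what is proved, stated in full; the proofs are below) =====
def Claim_equal_generate_seq : Prop := ∀ (n : Int), Dom_generate_seq n → Pre_generate_seq n → Spec_generate_seq n (generate_seq n)

-- ===== LEMMAS AND PROOFS =====


def tri : Nat → Nat
  | 0 => 0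
  | k+1 => tri k + (k+1)

def fval (i : Nat) : Nat := (Nat.sqrt (8*i+1) - 1)/2 + 1

theorem tri_mul (k : Nat) : 2 * tri k = k * (k+1) := by
  induction k with
  | zero => rfl
  | succ j ih => simp only [tri]; ring_nf; ring_nf at ih; omega

theorem fval_block (k i : Nat) (h1 : tri k ≤ i) (h2 : i < tri (k+1)) : fval i = k + 1 := by
  have ht : 2 * tri k = k * (k+1) := tri_mul k
  have ht2 : tri (k+1) = tri k + (k+1) := rfl
  have hs1 : 2*k+1 ≤ Nat.sqrt (8*i+1) := Nat.le_sqrt'.mpr (by nlinarith)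
  have hs2 : Nat.sqrt (8*i+1) < 2*k+3 := Nat.sqrt_lt'.mpr (by nlinarith)
  unfold fval; omega

theorem fval_bounds (i : Nat) : 1 ≤ fval i ∧ tri (fval i - 1) ≤ i ∧ i < tri (fval i) := by
  have hle : Nat.sqrt (8*i+1) * Nat.sqrt (8*i+1) ≤ 8*i+1 := by have := Nat.sqrt_le' (8*i+1); nlinarith [this]
  have hlt : 8*i+1 < (Nat.sqrt (8*i+1) + 1) * (Nat.sqrt (8*i+1) + 1) := by have := Nat.lt_succ_sqrt' (8*i+1); nlinarith [this]
  have hs1 : 1 ≤ Nat.sqrt (8*i+1) := Nat.le_sqrt'.mpr (by nlinarith)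
  set s := Nat.sqrt (8*i+1) with hs
  have hk : fval i = (s-1)/2 + 1 := rfl
  set k := fval i with hkk
  have h1 : 1 ≤ k := by omega
  obtain ⟨j, hj⟩ : ∃ j, k = j + 1 := ⟨k - 1, by omega⟩
  have hsb : 2*j + 1 ≤ s ∧ s ≤ 2*j + 2 := by omega
  have ht1 : 2 * tri j = j * (j+1) := tri_mul j
  have ht2 : 2 * tri (j+1) = (j+1) * (j+2) := by have := tri_mul (j+1); linarith [this]
  refine ⟨h1, ?_, ?_⟩
  · have : tri j ≤ i := by nlinarith
    simpa [hj] using this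
  · have : i < tri (j+1) := by nlinarith
    simpa [hj] using this

def seqn (m : Nat) : List Int := (List.range m).map (fun i => ((fval i : Nat) : Int))

theorem block_map (k d : Nat) (hd : d ≤ k+1) :
    (List.range' (tri k) d).map (fun i => ((fval i : Nat) : Int)) = List.replicate d ((k+1 : Nat) : Int) := by
  rw [List.eq_replicate_iff]
  refine ⟨by simp, ?_⟩
  intro x hx
  simp only [List.mem_map] at hx
  obtain ⟨i, hi, rfl⟩ := hx
  rw [List.mem_range'_1] at hi
  have : fval i = k + 1 := fval_block k i hi.1 (by have : tri (k+1) = tri k + (k+1) := rfl; omega)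
  rw [this]

theorem seqn_add (m d : Nat) :
    seqn (m + d) = seqn m ++ (List.range' m d).map (fun i => ((fval i : Nat) : Int)) := by
  simp only [seqn, List.range_eq_range']
  rw [show List.range' 0 (m + d) = List.range' 0 m ++ List.range' m d by
        simpa using (List.range'_append (s := 0) (m := m) (n := d) (step := 1)).symm]
  simp

theorem aInner_eq (fuel : Nat) : ∀ (n number cur : Int) (res : List Int), cur ≤ n →
    aInner n number cur res fuel =
      if n - cur < (fuel : Int) then
        (some (res ++ List.replicate (n - cur).toNat number), n,
         res ++ List.replicate (n - cur).toNat number)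
      else (none, cur + fuel, res ++ List.replicate fuel number) := by
  induction fuel with
  | zero =>
    intro n number cur res h
    rw [if_neg (by omega)]
    simp [aInner]
  | succ f ih =>
    intro n number cur res h
    simp only [aInner]
    by_cases hc : cur = n
    · subst hc
      rw [if_pos (by simp), if_pos (by push_cast; omega)]
      simp
    · rw [if_neg (by simpa using hc), ih n number (cur+1) (res ++ [number]) (by omega)]
      have hrep : ∀ m : Nat, res ++ [number] ++ List.replicate m number
          = res ++ List.replicate (m+1) number := by
        intro m; simp [List.replicate_succ]
      by_cases hlt : n - cur < ((f:Int) + 1)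
      · rw [if_pos (by omega), if_pos (by push_cast; omega),
           show (n - cur).toNat = (n - (cur+1)).toNat + 1 by omega, ← hrep]
      · rw [if_neg (by omega), if_neg (by push_cast; omega), hrep f]
        simp only [Prod.mk.injEq, true_and, and_true]
        push_cast; ring

theorem cast_tri_succ (j : Nat) : ((tri (j+1) : Nat) : Int) = (tri j : Int) + ((j:Int)+1) := by
  show ((tri j + (j+1) : Nat) : Int) = _
  push_cast; ring

theorem aOuter_eq (fuel : Nat) : ∀ (j : Nat) (n : Int),
    (tri j : Int) ≤ n → n < (tri j : Int) + fuel →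
    aOuter n ((j:Int)+1) ((tri j : Nat) : Int) (seqn (tri j)) fuel = seqn n.toNat := by
  induction fuel with
  | zero => intro j n h1 h2; omega
  | succ f ih =>
    intro j n h1 h2
    simp only [aOuter]
    rw [show ((j:Int)+1).toNat = j + 1 by omega,
        aInner_eq (j+1) n ((j:Int)+1) ((tri j : Nat) : Int) (seqn (tri j)) h1]
    by_cases hlt : n - (tri j : Int) < ((j+1 : Nat) : Int)
    · rw [if_pos hlt]
      show seqn (tri j) ++ List.replicate (n - (tri j : Int)).toNat ((j:Int)+1) = seqn n.toNat
      have hd : n.toNat = tri j + (n - (tri j : Int)).toNat := by omega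
      rw [hd, seqn_add, block_map j _ (by push_cast at hlt; omega)]
      norm_cast
    · rw [if_neg hlt]
      show aOuter n ((j:Int)+1+1) (((tri j : Nat) : Int) + ((j+1 : Nat) : Int))
          (seqn (tri j) ++ List.replicate (j+1) ((j:Int)+1)) f = seqn n.toNat
      have e1 : ((j:Int)+1+1) = (((j+1 : Nat) : Int)+1) := by push_cast; ring
      have e2 : ((tri j : Nat) : Int) + ((j+1 : Nat) : Int) = ((tri (j+1) : Nat) : Int) := by
        rw [cast_tri_succ]; push_cast; ring
      have e3 : seqn (tri j) ++ List.replicate (j+1) ((j:Int)+1) = seqn (tri (j+1)) := by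
        have : tri (j+1) = tri j + (j+1) := rfl
        rw [this, seqn_add, block_map j (j+1) le_rfl]
        norm_cast
      rw [e1, e2, e3]
      apply ih (j+1) n
      · rw [cast_tri_succ]; push_cast at hlt ⊢; omega
      · rw [cast_tri_succ]; push_cast at h2 ⊢; omega

theorem a_eq (n : Int) (h : 0 ≤ n) : generate_seq n = seqn n.toNat := by
  have := aOuter_eq (n.toNat + 1) 0 n (by show ((0:Nat):Int) ≤ n; omega) (by show n < ((0:Nat):Int) + _; push_cast; omega)
  simpa [tri, seqn, generate_seq] using this

theorem tri_ge (k : Nat) : k ≤ tri k := by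
  induction k with
  | zero => simp [tri]
  | succ j ih => simp only [tri]; omega

theorem seqn_succ (m : Nat) : seqn (m+1) = seqn m ++ [((fval m : Nat) : Int)] := by
  rw [seqn_add m 1]; rfl

theorem fval_zero : fval 0 = 1 := by decide

theorem b_inv (m : Nat) :
    (PySem.List.pyRange 0 (m : Int) 1).foldl bStep (1, 1, ([] : List Int))
      = (((fval (m-1) : Nat) : Int), ((tri (fval (m-1)) : Nat) : Int), seqn m) := by
  induction m with
  | zero =>
    simp only [Nat.cast_zero]
    rw [PySem.List.pyRange_one_eq_nil le_rfl]
    simp [fval_zero, tri, seqn]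
  | succ m ih =>
    rw [show ((m+1 : Nat) : Int) = (m : Int) + 1 by push_cast; ring,
        PySem.List.pyRange_one_succ_right (by positivity), List.foldl_append, ih]
    simp only [List.foldl_cons, List.foldl_nil]
    obtain ⟨hK1, hKlo, hKhi⟩ := fval_bounds (m-1)
    set K := fval (m-1) with hKdef
    have hmle : m ≤ tri K := by
      rcases Nat.eq_zero_or_pos m with rfl | hm
      · have := tri_ge K; omega
      · omega
    by_cases hc : m = tri K
    · have hfm : fval m = K + 1 := fval_block K m (by omega) (by have : tri (K+1) = tri K + (K+1) := rfl; omega)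
      have hbeq : ((m : Int) == ((tri K : Nat) : Int)) = true := by simp [hc]
      simp only [bStep, hbeq, if_true]
      rw [seqn_succ, show (m+1) - 1 = m by omega, hfm, cast_tri_succ]
      push_cast
      ring_nf
    · have hfm : fval m = K := by
        have := fval_block (K-1) m (by omega) (by rw [show K - 1 + 1 = K by omega]; omega)
        omega
      have hbeq : ((m : Int) == ((tri K : Nat) : Int)) = false := by
        simp; exact_mod_cast fun h => hc (by exact_mod_cast h)
      simp only [bStep, hbeq, if_false, Bool.false_eq_true]
      rw [seqn_succ, show (m+1) - 1 = m by omega, hfm]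

theorem b_eq (n : Int) (h : 0 ≤ n) : generate_seq_alt n = seqn n.toNat := by
  have := b_inv n.toNat
  rw [show ((n.toNat : Nat) : Int) = n by omega] at this
  simp [generate_seq_alt, this]

-- ===== VERDICT (by name: the statement is the Claim_ definition above) =====
theorem generate_seq_spec : Claim_equal_generate_seq := by
  intro n _ hpre
  show generate_seq n = generate_seq_alt n
  rw [a_eq n hpre, b_eq n hpre]
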